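-- pv_equiv track=rewrite | github.com/jcolinpatrick/kryptos | scripts/cfm/e_cfm_00_drusilla_hypothesis.py | keyword_to_perm
-- ===== SOURCE A (Python) =====
-- def keyword_to_perm(keyword: str, length: int) -> list:
--     """Convert a keyword to a columnar transposition permutation."""
--     width = len(keyword)
--     if width < 2 or width > length:
--         return None
--     # Number columns by keyword alphabetical order
--     order = sorted(range(width), key=lambda i: (keyword[i], i))
--     col_order = [0] * width
--     for rank, col in enumerate(order):
--         col_order[col] = rank
--
--     nrows = (length + width - 1) // width
--     perm = []
--     for rank in range(width):
--         col = order[rank]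
--         for row in range(nrows):
--             pos = row * width + col
--             if pos < length:
--                 perm.append(pos)
--     if len(perm) != length:
--         return None
--     return perm
-- ===== SOURCE B (Python) =====
-- def keyword_to_perm(keyword: str, length: int) -> list:
--     """Convert a keyword to a columnar transposition permutation."""
--     width = len(keyword)
--     if width < 2 or width > length:
--         return None
--     order = sorted(range(width), key=lambda i: (keyword[i], i))
--     col_order = [0] * width
--     for rank, col in enumerate(order):
--         col_order[col] = rank
--     # one flat sort of all positions: column rank first, then position
--     return sorted(range(length), key=lambda pos: col_order[pos % width] * length + pos)
-- ===== Notes on version B (the rewrite author's own statement) =====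
-- stated objective: simpler
-- what changed: A emits positions via a nested rank-by-row loop with a trailing length check; B instead sorts all positions 0..length-1 once by the flat key col_order[pos % width]*length + pos (column rank, then position), using the col_order table A builds but never uses.
import Mathlib
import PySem

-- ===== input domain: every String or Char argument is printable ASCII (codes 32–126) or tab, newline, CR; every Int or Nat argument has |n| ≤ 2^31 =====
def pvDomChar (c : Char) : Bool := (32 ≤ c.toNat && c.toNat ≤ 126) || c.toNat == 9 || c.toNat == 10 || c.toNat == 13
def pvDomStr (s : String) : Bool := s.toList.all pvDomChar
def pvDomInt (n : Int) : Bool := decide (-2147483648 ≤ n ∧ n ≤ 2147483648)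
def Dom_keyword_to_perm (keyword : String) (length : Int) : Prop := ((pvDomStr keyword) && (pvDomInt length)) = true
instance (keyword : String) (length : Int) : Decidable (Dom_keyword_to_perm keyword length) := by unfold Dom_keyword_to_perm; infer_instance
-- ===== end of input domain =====

-- B replaces A's nested column-by-row emission loop with one flat sort of all positions
-- keyed by (column rank, position) flattened to a single integer key (objective: simpler).


-- ===== PORT A =====
def keyword_to_perm (keyword : String) (length : Int) : Option (List Int) :=
  let width : Int := PySem.Str.len keyword
  if width < 2 ∨ width > length then none else
  let order := PySem.List.sorted2 (PySem.List.pyRange 0 width)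
      (fun i => PySem.List.pyGetD keyword.toList i ' ') (fun i => i)
  let col_order := (PySem.List.enumerate order).foldl
      (fun co rc => PySem.List.pySetD co rc.2 rc.1) (List.replicate width.toNat 0)
  let nrows := PySem.Int.floordiv (length + width - 1) width
  let perm := (PySem.List.pyRange 0 width).foldl (fun acc rank =>
      (PySem.List.pyRange 0 nrows).foldl (fun acc2 row =>
        if row * width + PySem.List.pyGetD order rank 0 < length
        then acc2 ++ [row * width + PySem.List.pyGetD order rank 0] else acc2) acc) []
  if PySem.List.len perm ≠ length then none else some perm

-- ===== PORT B =====
def keyword_to_perm_alt (keyword : String) (length : Int) : Option (List Int) :=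
  let width : Int := PySem.Str.len keyword
  if width < 2 ∨ width > length then none else
  let order := PySem.List.sorted2 (PySem.List.pyRange 0 width)
      (fun i => PySem.List.pyGetD keyword.toList i ' ') (fun i => i)
  let col_order := (PySem.List.enumerate order).foldl
      (fun co rc => PySem.List.pySetD co rc.2 rc.1) (List.replicate width.toNat 0)
  some (PySem.List.sorted (PySem.List.pyRange 0 length)
      (fun pos => PySem.List.pyGetD col_order (PySem.Int.mod pos width) 0 * length + pos))

-- ===== PRECONDITION & SPEC =====
def Spec_keyword_to_perm (keyword : String) (length : Int) (out : Option (List Int)) : Prop := out = keyword_to_perm_alt keyword length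
instance (keyword : String) (length : Int) (out : Option (List Int)) : Decidable (Spec_keyword_to_perm keyword length out) := by unfold Spec_keyword_to_perm; infer_instance

-- ===== CLAIM (what is proved, stated in full; the proofs are below) =====
def Claim_equal_keyword_to_perm : Prop := ∀ (keyword : String) (length : Int), Dom_keyword_to_perm keyword length → Spec_keyword_to_perm keyword length (keyword_to_perm keyword length)

-- ===== LEMMAS AND PROOFS =====

-- column block emitted by A for column index c
def blockF (w L nrows c : Int) : List Int :=
  ((PySem.List.pyRange 0 nrows).filter (fun row => decide (row * w + c < L))).map
    (fun row => row * w + c)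

-- indices not in xs are untouched by the enumerate/set fold
lemma fold_set_keep (xs : List Int) (s : Int) (co : List Int) (j : Int)
    (hpos : ∀ c ∈ xs, 0 ≤ c) (hj : j ∉ xs) (hj0 : 0 ≤ j) :
    PySem.List.pyGetD ((PySem.List.enumerate xs s).foldl
      (fun co rc => PySem.List.pySetD co rc.2 rc.1) co) j 0
      = PySem.List.pyGetD co j 0 := by
  induction xs generalizing s co with
  | nil => simp [PySem.List.enumerate_nil]
  | cons x t ih =>
    rw [PySem.List.enumerate_cons]
    simp only [List.foldl_cons]
    rw [ih (s+1) _ (fun c hc => hpos c (List.mem_cons_of_mem _ hc)) (fun h => hj (List.mem_cons_of_mem _ h))]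
    have hx0 : 0 ≤ x := hpos x (List.mem_cons_self)
    have hxj : x ≠ j := fun h => hj (h ▸ List.mem_cons_self)
    rw [PySem.List.pySetD_of_nonneg (h := hx0)]
    have hj' : j = ((j.toNat : Nat) : Int) := by omega
    rw [hj', PySem.List.pyGetD_natCast, PySem.List.pyGetD_natCast]
    have hne : x.toNat ≠ j.toNat := by omega
    simp [List.getD, List.getElem?_set_ne hne]

-- the fold writes rank k at position xs[k]
lemma fold_set_spec (xs : List Int) (s : Int) (co : List Int)
    (hnd : xs.Nodup) (hb : ∀ c ∈ xs, 0 ≤ c ∧ c.toNat < co.length) :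
    ∀ k (hk : k < xs.length),
      PySem.List.pyGetD ((PySem.List.enumerate xs s).foldl
        (fun co rc => PySem.List.pySetD co rc.2 rc.1) co) xs[k] 0 = s + (k : Int) := by
  induction xs generalizing s co with
  | nil => intro k hk; simp at hk
  | cons x t ih =>
    intro k hk
    rw [PySem.List.enumerate_cons]
    simp only [List.foldl_cons]
    have hx := hb x List.mem_cons_self
    match k with
    | 0 =>
      simp only [List.getElem_cons_zero]
      rw [fold_set_keep t (s+1) _ x (fun c hc => (hb c (List.mem_cons_of_mem _ hc)).1)
          (by simp at hnd; exact hnd.1) hx.1]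
      rw [PySem.List.pySetD_of_nonneg (h := hx.1)]
      have hx' : x = ((x.toNat : Nat) : Int) := by omega
      rw [hx', PySem.List.pyGetD_natCast]
      have hmax : (max x 0).toNat = x.toNat := by omega
      simp [List.getD, hmax, hx.2]
    | k+1 =>
      simp only [List.getElem_cons_succ]
      have := ih (s+1) (co.set x.toNat s) (by simp at hnd; exact hnd.2)
        (fun c hc => by have := hb c (List.mem_cons_of_mem _ hc); simpa using this)
        k (by simpa using hk)
      rw [PySem.List.pySetD_of_nonneg (h := hx.1)]
      rw [this]
      push_cast
      ring

-- the core equality, with order and col_order abstracted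
lemma core (w L : Int) (order co : List Int)
    (h2 : 2 ≤ w) (hL : w ≤ L)
    (hord : order.Perm (PySem.List.pyRange 0 w))
    (hco : ∀ k (hk : k < order.length), PySem.List.pyGetD co order[k] 0 = (k : Int)) :
    (if PySem.List.len ((PySem.List.pyRange 0 w).foldl (fun acc rank =>
        (PySem.List.pyRange 0 (PySem.Int.floordiv (L + w - 1) w)).foldl (fun acc2 row =>
          if row * w + PySem.List.pyGetD order rank 0 < L
          then acc2 ++ [row * w + PySem.List.pyGetD order rank 0] else acc2) acc) []) ≠ L
     then none
     else some ((PySem.List.pyRange 0 w).foldl (fun acc rank =>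
        (PySem.List.pyRange 0 (PySem.Int.floordiv (L + w - 1) w)).foldl (fun acc2 row =>
          if row * w + PySem.List.pyGetD order rank 0 < L
          then acc2 ++ [row * w + PySem.List.pyGetD order rank 0] else acc2) acc) []))
    = some (PySem.List.sorted (PySem.List.pyRange 0 L)
        (fun pos => PySem.List.pyGetD co (PySem.Int.mod pos w) 0 * L + pos)) := by
  have hw0 : 0 < w := by omega
  set nrows := PySem.Int.floordiv (L + w - 1) w with hnr
  have hlen : (order.length : Int) = w := by
    rw [hord.length_eq, PySem.List.length_pyRange_one]; omega
  have hmem : ∀ c, c ∈ order ↔ (0 ≤ c ∧ c < w) := by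
    intro c; rw [hord.mem_iff, PySem.List.mem_pyRange_one]
  have hnd : order.Nodup := hord.symm.nodup (PySem.List.nodup_pyRange_one 0 w)
  -- A's nested loop is a flatMap of column blocks over order
  have hfold : (PySem.List.pyRange 0 w).foldl (fun acc rank =>
        (PySem.List.pyRange 0 nrows).foldl (fun acc2 row =>
          if row * w + PySem.List.pyGetD order rank 0 < L
          then acc2 ++ [row * w + PySem.List.pyGetD order rank 0] else acc2) acc) []
      = order.flatMap (blockF w L nrows) := by
    have h1 : ∀ (acc : List Int) (c : Int),
        (PySem.List.pyRange 0 nrows).foldl (fun acc2 row =>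
          if row * w + c < L then acc2 ++ [row * w + c] else acc2) acc
        = acc ++ blockF w L nrows c := by
      intro acc c
      exact PySem.List.foldl_append_ite (fun row => row * w + c < L) (fun row => row * w + c) _ acc
    calc (PySem.List.pyRange 0 w).foldl (fun acc rank =>
        (PySem.List.pyRange 0 nrows).foldl (fun acc2 row =>
          if row * w + PySem.List.pyGetD order rank 0 < L
          then acc2 ++ [row * w + PySem.List.pyGetD order rank 0] else acc2) acc) []
        = (PySem.List.pyRange 0 w).foldl (fun acc rank =>
            acc ++ blockF w L nrows (PySem.List.pyGetD order rank 0)) [] := by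
          exact PySem.List.foldl_congr_mem (l := PySem.List.pyRange 0 w) (init := [])
            (f := fun acc rank => (PySem.List.pyRange 0 nrows).foldl (fun acc2 row =>
              if row * w + PySem.List.pyGetD order rank 0 < L
              then acc2 ++ [row * w + PySem.List.pyGetD order rank 0] else acc2) acc)
            (g := fun acc rank => acc ++ blockF w L nrows (PySem.List.pyGetD order rank 0))
            (fun acc rank _ => h1 acc _)
      _ = List.flatMap (fun rank => blockF w L nrows (PySem.List.pyGetD order rank 0)) (PySem.List.pyRange 0 w) := by
          rw [PySem.List.foldl_append_eq_flatMap]; rfl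
      _ = ((PySem.List.pyRange 0 w).map (fun rank => PySem.List.pyGetD order rank 0)).flatMap (blockF w L nrows) := by
          rw [List.flatMap_map]
      _ = order.flatMap (blockF w L nrows) := by
          rw [← hlen, PySem.List.map_pyGetD_pyRange_zero']
  -- facts about elements of a block
  have hApos : ∀ c ∈ order, ∀ x ∈ blockF w L nrows c,
      0 ≤ x ∧ x < L ∧ PySem.Int.mod x w = c := by
    intro c hc x hx
    obtain ⟨hc0, hcw⟩ := (hmem c).1 hc
    simp only [blockF, List.mem_map, List.mem_filter, PySem.List.mem_pyRange_one,
      decide_eq_true_eq] at hx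
    obtain ⟨row, ⟨⟨hr0, _⟩, hlt⟩, rfl⟩ := hx
    refine ⟨by nlinarith, hlt, ?_⟩
    rw [PySem.Int.mod_eq_emod_of_pos hw0, add_comm, Int.add_mul_emod_self_right,
      Int.emod_eq_of_lt hc0 hcw]
  -- each block is strictly increasing
  have hblock_pw : ∀ c, (blockF w L nrows c).Pairwise (· < ·) := by
    intro c
    refine List.Pairwise.map _ (fun a b hab => ?_)
      ((PySem.List.pairwise_lt_pyRange_one 0 nrows).filter _)
    nlinarith
  -- rank strictly increases along order
  have hpwr : order.Pairwise
      (fun c c' => PySem.List.pyGetD co c 0 < PySem.List.pyGetD co c' 0) := by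
    rw [List.pairwise_iff_getElem]
    intro i j hi hj hij
    rw [hco i hi, hco j hj]; exact_mod_cast hij
  set key : Int → Int := fun pos => PySem.List.pyGetD co (PySem.Int.mod pos w) 0 * L + pos with hkeydef
  -- the whole emission is strictly increasing under the flat key
  have hpwkey : (order.flatMap (blockF w L nrows)).Pairwise (fun a b => key a < key b) := by
    rw [List.pairwise_flatMap]
    constructor
    · intro c hc
      refine ((hblock_pw c).imp_of_mem ?_)
      intro a b ha hb hab
      have hA := hApos c hc a ha
      have hB := hApos c hc b hb
      simp only [hkeydef, hA.2.2, hB.2.2]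
      omega
    · refine hpwr.imp_of_mem ?_
      intro c c' hc hc' hlt a ha b hb
      have hA := hApos c hc a ha
      have hB := hApos c' hc' b hb
      simp only [hkeydef, hA.2.2, hB.2.2]
      have hmul : (PySem.List.pyGetD co c 0 + 1) * L ≤ PySem.List.pyGetD co c' 0 * L :=
        mul_le_mul_of_nonneg_right (by omega) (by omega)
      nlinarith [hA.1, hA.2.1, hB.1]
  have hnodupA : (order.flatMap (blockF w L nrows)).Nodup := by
    refine hpwkey.imp ?_
    intro a b h heq
    exact absurd (heq ▸ h) (lt_irrefl _)
  -- membership: exactly the positions 0 .. L-1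
  have hmemA : ∀ x, x ∈ order.flatMap (blockF w L nrows) ↔ x ∈ PySem.List.pyRange 0 L := by
    intro x
    rw [PySem.List.mem_pyRange_one, List.mem_flatMap]
    constructor
    · rintro ⟨c, hc, hx⟩
      have := hApos c hc x hx
      exact ⟨this.1, this.2.1⟩
    · rintro ⟨hx0, hxL⟩
      refine ⟨PySem.Int.mod x w, (hmem _).2
        ⟨PySem.Int.mod_nonneg x hw0, PySem.Int.mod_lt x hw0⟩, ?_⟩
      simp only [blockF, List.mem_map, List.mem_filter, PySem.List.mem_pyRange_one,
        decide_eq_true_eq]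
      have hdm := PySem.Int.floordiv_mul_add_mod x w
      refine ⟨PySem.Int.floordiv x w, ⟨⟨?_, ?_⟩, by omega⟩, by omega⟩
      · rw [PySem.Int.floordiv_eq_ediv_of_pos hw0]
        exact Int.ediv_nonneg hx0 (by omega)
      · rw [hnr, PySem.Int.floordiv_eq_ediv_of_pos hw0,
          PySem.Int.floordiv_eq_ediv_of_pos hw0]
        have e1 : (L + w - 1) / w = (L - 1) / w + 1 := by
          have : L + w - 1 = (L - 1) + 1 * w := by ring
          rw [this, Int.add_mul_ediv_right _ _ (by omega)]
        have e2 : x / w ≤ (L - 1) / w := Int.ediv_le_ediv hw0 (by omega)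
        omega
  have hperm : (order.flatMap (blockF w L nrows)).Perm (PySem.List.pyRange 0 L) :=
    (List.perm_ext_iff_of_nodup hnodupA (PySem.List.nodup_pyRange_one 0 L)).2 hmemA
  have hsorted : PySem.List.sorted (PySem.List.pyRange 0 L) key
      = order.flatMap (blockF w L nrows) :=
    PySem.List.sorted_eq_of_perm_of_pairwise_lt _ _ _ hperm hpwkey
  have hlenA : PySem.List.len (order.flatMap (blockF w L nrows)) = L := by
    rw [PySem.List.len_eq, hperm.length_eq, PySem.List.length_pyRange_one]
    omega
  rw [hfold, hlenA, if_neg (by simp), hsorted]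

-- ===== VERDICT (by name: the statement is the Claim_ definition above) =====
theorem keyword_to_perm_spec : Claim_equal_keyword_to_perm := by
  intro keyword length _
  unfold Spec_keyword_to_perm keyword_to_perm keyword_to_perm_alt
  by_cases hg : (PySem.Str.len keyword) < 2 ∨ (PySem.Str.len keyword) > length
  · simp only [hg, if_true]
  · simp only [hg, if_false]
    rw [not_or] at hg
    obtain ⟨hg1, hg2⟩ := hg
    have hord := PySem.List.sorted2_perm (PySem.List.pyRange 0 (PySem.Str.len keyword))
      (fun i => PySem.List.pyGetD keyword.toList i ' ') (fun i => i) false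
    refine core (PySem.Str.len keyword) length _ _ (by omega) (by omega) hord ?_
    intro k hk
    have hmemo : ∀ c ∈ PySem.List.sorted2 (PySem.List.pyRange 0 (PySem.Str.len keyword))
        (fun i => PySem.List.pyGetD keyword.toList i ' ') (fun i => i),
        0 ≤ c ∧ c.toNat < (List.replicate (PySem.Str.len keyword).toNat (0:Int)).length := by
      intro c hc
      have := (PySem.List.mem_pyRange_one).1 (hord.mem_iff.1 hc)
      simp only [List.length_replicate]
      omega
    have := fold_set_spec _ 0 _ (hord.symm.nodup
      (PySem.List.nodup_pyRange_one 0 (PySem.Str.len keyword))) hmemo k hk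
    simpa using this
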